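-- pv_equiv track=rewrite | github.com/ChaissonLab/danbing-tk | script/kmerutils.py | getNextKmer
-- ===== SOURCE A (Python) =====
-- base2num = {'A':0, 'C':1,  'G':2,  'T':3}
--
-- def encodeString(string):
--     """Direct encoding. Use string2CaKmer() for canonical encoding"""
--     numericString = 0
--     for i in range(len(string)):
--         numericString = (numericString << 2) + base2num[string[i]]
--
--     return numericString
--
-- def getNextKmer(beg, seq, k):
--     if beg + k >= len(seq):
--         return (len(seq), 0)
--
--     validlen = 0
--     while validlen != k:
--         if beg + k >= len(seq):
--             return (len(seq), 0)
--         if seq[(beg + validlen)] not in base2num: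
--             beg = beg + validlen + 1
--             validlen = 0
--         else:
--             validlen += 1
--
--     return (beg, encodeString(seq[beg:beg + k]))
-- ===== SOURCE B (Python) =====
-- base2num = {'A':0, 'C':1,  'G':2,  'T':3}
--
-- def encodeString(string):
--     """Direct encoding. Use string2CaKmer() for canonical encoding"""
--     numericString = 0
--     for i in range(len(string)):
--         numericString = (numericString << 2) + base2num[string[i]]
--     return numericString
--
-- def getNextKmer(beg, seq, k):
--     # stage 1: collect every invalid position once; stage 2: fold the window
--     # start past each invalid position that falls inside the current window
--     n = len(seq)
--     if beg + k >= n: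
--         return (n, 0)
--     bad = [i for i in range(beg, n) if seq[i] not in base2num]
--     b = beg
--     for p in bad:
--         if b <= p < b + k:
--             b = p + 1
--     if b + k >= n:
--         return (n, 0)
--     return (b, encodeString(seq[b:b+k]))
-- ===== Notes on version B (the rewrite author's own statement) =====
-- stated objective: alternative
-- what changed: Replaced A's single interleaved scan that carries a running valid-length counter reset on each invalid character by two staged passes: one comprehension collecting every invalid position, then a pure fold over that list pushing the window start past each invalid position inside the current window.
-- outside the precondition, e.g. on getNextKmer(-3, '', 0): A returns (-3, 0), B raises IndexError; on getNextKmer(-5, 'AB', 0): A returns (-5, 0), B raises IndexError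
import Mathlib
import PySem

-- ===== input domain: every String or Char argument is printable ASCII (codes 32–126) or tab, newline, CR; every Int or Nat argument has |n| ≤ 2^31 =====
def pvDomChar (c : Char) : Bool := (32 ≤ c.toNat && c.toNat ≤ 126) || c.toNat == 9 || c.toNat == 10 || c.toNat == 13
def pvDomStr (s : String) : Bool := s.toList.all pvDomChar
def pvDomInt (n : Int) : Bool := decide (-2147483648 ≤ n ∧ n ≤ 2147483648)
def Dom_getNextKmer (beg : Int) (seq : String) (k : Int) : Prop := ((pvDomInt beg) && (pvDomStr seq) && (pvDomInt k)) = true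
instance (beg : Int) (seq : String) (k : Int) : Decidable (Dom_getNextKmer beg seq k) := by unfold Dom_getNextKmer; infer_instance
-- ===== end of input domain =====

-- B replaces A's single interleaved scan carrying a running valid-length counter (reset on
-- each invalid character) by two staged passes: collect every invalid position once, then
-- fold the window start past each invalid position inside the current window (objective:
-- alternative decomposition).

-- ===== PORT A =====

-- base2num = {'A':0, 'C':1, 'G':2, 'T':3}
def pvBase2num : PySem.Dict Char Int :=
  PySem.Dict.ofList [('A', 0), ('C', 1), ('G', 2), ('T', 3)]

-- encodeString: Python raises KeyError on a character outside base2num; every call site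
-- below passes only characters that were checked against base2num, so getD _ 0 is exact there.
def encodeString (cs : List Char) : Int :=
  cs.foldl (fun ns c => (ns <<< (2 : Nat)) + pvBase2num.getD c 0) 0

-- A's while-loop, state (beg, validlen); the Nat fuel only guards totality
-- (2*len+2 at the call site is enough for every input Pre_ admits)
def getNextKmerLoop (l : List Char) (k : Int) : Nat → Int → Int → Int × Int
  | 0, _, _ => ((l.length : Int), 0)   -- fuel exhausted: unreachable under Pre_
  | fuel + 1, b, v =>
    if v ≠ k then
      if b + k ≥ (l.length : Int) then ((l.length : Int), 0)
      else
        match PySem.List.pyGet? l (b + v) with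
        | none => ((l.length : Int), 0)   -- Python raises IndexError here; excluded by Pre_
        | some c =>
          if pvBase2num.contains c = false then getNextKmerLoop l k fuel (b + v + 1) 0
          else getNextKmerLoop l k fuel b (v + 1)
    else (b, encodeString (PySem.List.slice l (some b) (some (b + k))))

def getNextKmer (beg : Int) (seq : String) (k : Int) : Int × Int :=
  if beg + k ≥ (seq.toList.length : Int) then ((seq.toList.length : Int), 0)
  else getNextKmerLoop seq.toList k (2 * seq.toList.length + 2) beg 0

-- ===== PORT B =====

-- 'seq[i] not in base2num'; Python raises IndexError on an out-of-range i (the 'none'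
-- branch), which Pre_ excludes
def isBadAt (l : List Char) (i : Int) : Bool :=
  match PySem.List.pyGet? l i with
  | some c => !pvBase2num.contains c
  | none => true

-- bad = [i for i in range(t, len(seq)) if seq[i] not in base2num]
def badPositions (l : List Char) (t : Int) : List Int :=
  (PySem.List.pyRange t (l.length : Int) 1).filter (isBadAt l)

-- the loop body: push the window start past an invalid position inside the window
def stepStart (k b p : Int) : Int := if b ≤ p ∧ p < b + k then p + 1 else b

def getNextKmer_alt (beg : Int) (seq : String) (k : Int) : Int × Int :=
  let l := seq.toList
  let n : Int := (l.length : Int)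
  if beg + k ≥ n then (n, 0)
  else
    let b := (badPositions l beg).foldl (stepStart k) beg
    if b + k ≥ n then (n, 0)
    else (b, encodeString (PySem.List.slice l (some b) (some (b + k))))

-- ===== PRECONDITION & SPEC =====

-- Pre_ excludes exactly the inputs on which at least one side raises IndexError:
-- k < 0 with beg + k < len(seq) (A's index walks past the end of seq), and beg < -len(seq)
-- with beg + k < len(seq) (A's first access seq[beg] is out of range when k > 0; when
-- k = 0 A happens to return (beg, 0) there but B's comprehension pass raises — see cites).
def Pre_getNextKmer (beg : Int) (seq : String) (k : Int) : Prop :=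
  beg + k ≥ (seq.toList.length : Int) ∨ (0 ≤ k ∧ -(seq.toList.length : Int) ≤ beg)
instance (beg : Int) (seq : String) (k : Int) : Decidable (Pre_getNextKmer beg seq k) := by
  unfold Pre_getNextKmer; infer_instance

def pvWitness_getNextKmer : Int × String × Int := (1, "CANGAT", 3)

def Spec_getNextKmer (beg : Int) (seq : String) (k : Int) (out : Int × Int) : Prop := out = getNextKmer_alt beg seq k
instance (beg : Int) (seq : String) (k : Int) (out : Int × Int) : Decidable (Spec_getNextKmer beg seq k out) := by unfold Spec_getNextKmer; infer_instance

-- ===== CLAIM (what is proved, stated in full; the proofs are below) =====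
def Claim_equal_getNextKmer : Prop := ∀ (beg : Int) (seq : String) (k : Int), Dom_getNextKmer beg seq k → Pre_getNextKmer beg seq k → Spec_getNextKmer beg seq k (getNextKmer beg seq k)

-- ===== LEMMAS AND PROOFS =====

-- B's fold never moves the window start backwards
theorem foldl_step_ge (k : Int) :
    ∀ (L : List Int) (b : Int), b ≤ L.foldl (stepStart k) b := by
  intro L
  induction L with
  | nil => intro b; exact le_rfl
  | cons p L ih =>
    intro b
    refine le_trans ?_ (ih (stepStart k b p))
    unfold stepStart
    split
    · next h => omega
    · exact le_rfl

-- positions at or beyond the window's end never move the start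
theorem foldl_step_const (k : Int) :
    ∀ (L : List Int) (b : Int), (∀ p ∈ L, b + k ≤ p) → L.foldl (stepStart k) b = b := by
  intro L
  induction L with
  | nil => intro b _; rfl
  | cons p L ih =>
    intro b h
    have hp : b + k ≤ p := h p (List.mem_cons_self)
    have hstep : stepStart k b p = b := by unfold stepStart; split <;> omega
    rw [List.foldl_cons, hstep]
    exact ih b (fun q hq => h q (List.mem_cons_of_mem _ hq))

-- every collected bad position lies at or after the scan's start
theorem mem_badPositions_ge (l : List Char) (t p : Int) :
    p ∈ badPositions l t → t ≤ p := by
  intro hp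
  have := List.mem_filter.mp hp
  exact ((PySem.List.mem_pyRange_one).mp this.1).1

theorem badPositions_skip (l : List Char) (t : Int) (ht : t < (l.length : Int))
    (hgood : isBadAt l t = false) : badPositions l t = badPositions l (t + 1) := by
  unfold badPositions
  rw [PySem.List.pyRange_one_cons ht, List.filter_cons, hgood]
  simp

theorem badPositions_cons (l : List Char) (t : Int) (ht : t < (l.length : Int))
    (hbad : isBadAt l t = true) : badPositions l t = t :: badPositions l (t + 1) := by
  unfold badPositions
  rw [PySem.List.pyRange_one_cons ht, List.filter_cons, hbad]
  simp

-- the main invariant: A's loop at state (b, v) — the v characters from b already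
-- validated — equals B's staged computation restarted with the bad positions from b+v on
theorem loop_eq (l : List Char) (k : Int) :
    ∀ (fa : Nat) (b v : Int),
      ((l.length : Int) - b - v).toNat < fa →
      0 ≤ v → v ≤ k → -(l.length : Int) ≤ b →
      (v = k → b + k < (l.length : Int)) →
      (∀ i : Int, b ≤ i → i < b + v → isBadAt l i = false) →
      getNextKmerLoop l k fa b v =
        (if (badPositions l (b + v)).foldl (stepStart k) b + k ≥ (l.length : Int)
         then ((l.length : Int), 0)
         else ((badPositions l (b + v)).foldl (stepStart k) b,
               encodeString (PySem.List.slice l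
                 (some ((badPositions l (b + v)).foldl (stepStart k) b))
                 (some ((badPositions l (b + v)).foldl (stepStart k) b + k))))) := by
  intro fa
  induction fa with
  | zero => intro b v hfa; omega
  | succ fa ih =>
    intro b v hfa hv0 hvk hb hfull hpre
    by_cases hveq : v = k
    · have hbk : b + k < (l.length : Int) := hfull hveq
      have hfold : (badPositions l (b + v)).foldl (stepStart k) b = b :=
        foldl_step_const k _ b
          (fun p hp => by have := mem_badPositions_ge l (b + v) p hp; omega)
      rw [getNextKmerLoop, if_neg (not_not_intro hveq), hfold, if_neg (by omega)]
    · rw [getNextKmerLoop, if_pos hveq]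
      by_cases hbk : b + k ≥ (l.length : Int)
      · rw [if_pos hbk,
            if_pos (by have := foldl_step_ge k (badPositions l (b + v)) b; omega)]
      · rw [if_neg hbk]
        have hvlt : v < k := by omega
        obtain ⟨c, hc⟩ : ∃ c, PySem.List.pyGet? l (b + v) = some c := by
          cases hcc : PySem.List.pyGet? l (b + v) with
          | some c => exact ⟨c, rfl⟩
          | none =>
            rw [PySem.List.pyGet?_eq_none_iff] at hcc
            exact absurd (by unfold PySem.Raise.InRange; omega) hcc
        rw [hc]
        show (if pvBase2num.contains c = false then getNextKmerLoop l k fa (b + v + 1) 0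
              else getNextKmerLoop l k fa b (v + 1)) = _
        by_cases hval : pvBase2num.contains c = false
        · -- invalid character at b+v: A restarts at b+v+1; B's fold consumes that bad position
          rw [if_pos hval]
          have hbadt : isBadAt l (b + v) = true := by simp [isBadAt, hc, hval]
          have hcons := badPositions_cons l (b + v) (by omega) hbadt
          have hstep : stepStart k b (b + v) = b + v + 1 := by
            unfold stepStart; rw [if_pos (by omega)]
          have := ih (b + v + 1) 0 (by omega) le_rfl (by omega) (by omega)
            (fun h0 => by omega) (fun i hi hi0 => absurd hi0 (by omega))
          rw [this, hcons, List.foldl_cons, hstep]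
          norm_num
        · -- valid character at b+v: A extends the validated prefix; B's list is unchanged
          rw [if_neg hval]
          have hgood : isBadAt l (b + v) = false := by
            have hcc : pvBase2num.contains c = true := by
              cases hcc : pvBase2num.contains c
              · exact absurd hcc hval
              · rfl
            simp [isBadAt, hc, hcc]
          have hskip := badPositions_skip l (b + v) (by omega) hgood
          have := ih b (v + 1) (by omega) (by omega) (by omega) hb
            (fun _ => by omega)
            (fun i hi hiv => by
              by_cases hie : i = b + v
              · subst hie; exact hgood
              · exact hpre i hi (by omega))
          rw [this]
          rw [show b + (v + 1) = b + v + 1 from by ring, hskip]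

-- ===== VERDICT (by name: the statement is the Claim_ definition above) =====
theorem getNextKmer_spec : Claim_equal_getNextKmer := by
  intro beg seq k _ hpre
  unfold Spec_getNextKmer getNextKmer getNextKmer_alt
  by_cases hend : beg + k ≥ (seq.toList.length : Int)
  · rw [if_pos hend]; rw [if_pos hend]
  · rw [if_neg hend]
    have hk : 0 ≤ k ∧ -(seq.toList.length : Int) ≤ beg := by
      rcases hpre with h | h
      · omega
      · exact h
    have := loop_eq seq.toList k (2 * seq.toList.length + 2) beg 0
      (by omega) le_rfl hk.1 hk.2 (fun h0 => by omega)
      (fun i hi hi0 => absurd hi0 (by omega))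
    rw [this]
    simp only [add_zero]
    rw [if_neg hend]
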